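-- pv_equiv track=rewrite | github.com/Ayagad189/Bio_Project_Application | pages/3_DNA _Sequence_Analysis_fro_ FASTA_Files.py | Translation_Table
-- ===== SOURCE A (Python) =====
-- def Translation_Table(seq):
--     dic = {
--         "TTT": "F", "CTT": "L", "ATT": "I", "GTT": "V",
--         "TTC": "F", "CTC": "L", "ATC": "I", "GTC": "V",
--         "TTA": "L", "CTA": "L", "ATA": "I", "GTA": "V",
--         "TTG": "L", "CTG": "L", "ATG": "M", "GTG": "V",
--         "TCT": "S", "CCT": "P", "ACT": "T", "GCT": "A",
--         "TCC": "S", "CCC": "P", "ACC": "T", "GCC": "A",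
--         "TCA": "S", "CCA": "P", "ACA": "T", "GCA": "A",
--         "TCG": "S", "CCG": "P", "ACG": "T", "GCG": "A",
--         "TAT": "Y", "CAT": "H", "AAT": "N", "GAT": "D",
--         "TAC": "Y", "CAC": "H", "AAC": "N", "GAC": "D",
--         "TAA": "*", "CAA": "Q", "AAA": "K", "GAA": "E",
--         "TAG": "*", "CAG": "Q", "AAG": "K", "GAG": "E",
--         "TGT": "C", "CGT": "R", "AGT": "S", "GGT": "G",
--         "TGC": "C", "CGC": "R", "AGC": "S", "GGC": "G",
--         "TGA": "*", "CGA": "R", "AGA": "R", "GGA": "G",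
--         "TGG": "W", "CGG": "R", "AGG": "R", "GGG": "G"
--     }
--     s = ""
--     for i in range(0, len(seq) - 2, 3):
--         s += dic.get(seq[i:i + 3], "?")
--     return s
-- ===== SOURCE B (Python) =====
-- GENETIC_CODE = {
--     'T': {
--         'T': {'T': 'F', 'C': 'F', 'A': 'L', 'G': 'L'},
--         'C': {'T': 'S', 'C': 'S', 'A': 'S', 'G': 'S'},
--         'A': {'T': 'Y', 'C': 'Y', 'A': '*', 'G': '*'},
--         'G': {'T': 'C', 'C': 'C', 'A': '*', 'G': 'W'},
--     },
--     'C': {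
--         'T': {'T': 'L', 'C': 'L', 'A': 'L', 'G': 'L'},
--         'C': {'T': 'P', 'C': 'P', 'A': 'P', 'G': 'P'},
--         'A': {'T': 'H', 'C': 'H', 'A': 'Q', 'G': 'Q'},
--         'G': {'T': 'R', 'C': 'R', 'A': 'R', 'G': 'R'},
--     },
--     'A': {
--         'T': {'T': 'I', 'C': 'I', 'A': 'I', 'G': 'M'},
--         'C': {'T': 'T', 'C': 'T', 'A': 'T', 'G': 'T'},
--         'A': {'T': 'N', 'C': 'N', 'A': 'K', 'G': 'K'},
--         'G': {'T': 'S', 'C': 'S', 'A': 'R', 'G': 'R'},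
--     },
--     'G': {
--         'T': {'T': 'V', 'C': 'V', 'A': 'V', 'G': 'V'},
--         'C': {'T': 'A', 'C': 'A', 'A': 'A', 'G': 'A'},
--         'A': {'T': 'D', 'C': 'D', 'A': 'E', 'G': 'E'},
--         'G': {'T': 'G', 'C': 'G', 'A': 'G', 'G': 'G'},
--     },
-- }
--
-- def Translation_Table(seq):
--     it = iter(seq)
--     return "".join(
--         GENETIC_CODE.get(a, {}).get(b, {}).get(c, "?")
--         for a, b, c in zip(it, it, it)
--     )
-- ===== Notes on version B (the rewrite author's own statement) =====
-- stated objective: idiomatic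
-- what changed: Replaces the flat 64-entry codon->amino-acid dictionary and the index/slice loop by a three-level character trie (nested dicts) looked up base by base, with codons grouped by the zip(it,it,it) consecutive-triple idiom and the output assembled with str.join instead of repeated string concatenation.
import Mathlib
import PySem

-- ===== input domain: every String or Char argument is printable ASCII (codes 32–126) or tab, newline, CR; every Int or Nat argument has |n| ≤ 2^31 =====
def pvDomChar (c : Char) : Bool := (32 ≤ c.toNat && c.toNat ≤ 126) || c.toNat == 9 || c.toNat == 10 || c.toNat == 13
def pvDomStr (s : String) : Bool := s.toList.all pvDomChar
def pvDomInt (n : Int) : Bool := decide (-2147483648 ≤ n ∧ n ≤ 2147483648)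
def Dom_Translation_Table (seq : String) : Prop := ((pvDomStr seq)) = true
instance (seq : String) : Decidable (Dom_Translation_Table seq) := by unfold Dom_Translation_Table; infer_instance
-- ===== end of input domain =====

set_option maxRecDepth 10000
set_option maxHeartbeats 2000000


-- B replaces the flat codon dictionary and index/slice loop by a three-level character
-- trie looked up base by base, grouping codons with the zip(it,it,it) triple idiom and
-- assembling the output with str.join; objective: idiomatic, same cost.

-- ===== PORT A =====
def pvPairs : List (String × String) := [
  ("TTT", "F"), ("CTT", "L"), ("ATT", "I"), ("GTT", "V"),
  ("TTC", "F"), ("CTC", "L"), ("ATC", "I"), ("GTC", "V"),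
  ("TTA", "L"), ("CTA", "L"), ("ATA", "I"), ("GTA", "V"),
  ("TTG", "L"), ("CTG", "L"), ("ATG", "M"), ("GTG", "V"),
  ("TCT", "S"), ("CCT", "P"), ("ACT", "T"), ("GCT", "A"),
  ("TCC", "S"), ("CCC", "P"), ("ACC", "T"), ("GCC", "A"),
  ("TCA", "S"), ("CCA", "P"), ("ACA", "T"), ("GCA", "A"),
  ("TCG", "S"), ("CCG", "P"), ("ACG", "T"), ("GCG", "A"),
  ("TAT", "Y"), ("CAT", "H"), ("AAT", "N"), ("GAT", "D"),
  ("TAC", "Y"), ("CAC", "H"), ("AAC", "N"), ("GAC", "D"),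
  ("TAA", "*"), ("CAA", "Q"), ("AAA", "K"), ("GAA", "E"),
  ("TAG", "*"), ("CAG", "Q"), ("AAG", "K"), ("GAG", "E"),
  ("TGT", "C"), ("CGT", "R"), ("AGT", "S"), ("GGT", "G"),
  ("TGC", "C"), ("CGC", "R"), ("AGC", "S"), ("GGC", "G"),
  ("TGA", "*"), ("CGA", "R"), ("AGA", "R"), ("GGA", "G"),
  ("TGG", "W"), ("CGG", "R"), ("AGG", "R"), ("GGG", "G")]

def pvDicA : PySem.Dict String String := PySem.Dict.ofList pvPairs

def Translation_Table (seq : String) : String :=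
  (PySem.List.pyRange 0 (PySem.Str.len seq - 2) 3).foldl
    (fun s i => s ++ pvDicA.getD (PySem.Str.slice seq (some i) (some (i + 3))) "?") ""

-- ===== PORT B =====
def pvTrie : PySem.Dict Char (PySem.Dict Char (PySem.Dict Char String)) := PySem.Dict.mk [
  ('T', PySem.Dict.mk [
    ('T', PySem.Dict.mk [('T', "F"), ('C', "F"), ('A', "L"), ('G', "L")]),
    ('C', PySem.Dict.mk [('T', "S"), ('C', "S"), ('A', "S"), ('G', "S")]),
    ('A', PySem.Dict.mk [('T', "Y"), ('C', "Y"), ('A', "*"), ('G', "*")]),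
    ('G', PySem.Dict.mk [('T', "C"), ('C', "C"), ('A', "*"), ('G', "W")])]),
  ('C', PySem.Dict.mk [
    ('T', PySem.Dict.mk [('T', "L"), ('C', "L"), ('A', "L"), ('G', "L")]),
    ('C', PySem.Dict.mk [('T', "P"), ('C', "P"), ('A', "P"), ('G', "P")]),
    ('A', PySem.Dict.mk [('T', "H"), ('C', "H"), ('A', "Q"), ('G', "Q")]),
    ('G', PySem.Dict.mk [('T', "R"), ('C', "R"), ('A', "R"), ('G', "R")])]),
  ('A', PySem.Dict.mk [
    ('T', PySem.Dict.mk [('T', "I"), ('C', "I"), ('A', "I"), ('G', "M")]),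
    ('C', PySem.Dict.mk [('T', "T"), ('C', "T"), ('A', "T"), ('G', "T")]),
    ('A', PySem.Dict.mk [('T', "N"), ('C', "N"), ('A', "K"), ('G', "K")]),
    ('G', PySem.Dict.mk [('T', "S"), ('C', "S"), ('A', "R"), ('G', "R")])]),
  ('G', PySem.Dict.mk [
    ('T', PySem.Dict.mk [('T', "V"), ('C', "V"), ('A', "V"), ('G', "V")]),
    ('C', PySem.Dict.mk [('T', "A"), ('C', "A"), ('A', "A"), ('G', "A")]),
    ('A', PySem.Dict.mk [('T', "D"), ('C', "D"), ('A', "E"), ('G', "E")]),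
    ('G', PySem.Dict.mk [('T', "G"), ('C', "G"), ('A', "G"), ('G', "G")])])]

-- zip(it, it, it) over one iterator of seq: consecutive non-overlapping triples,
-- leftover (< 3 chars) dropped
def pvZip3 : List Char → List (Char × Char × Char)
  | a :: b :: c :: rest => (a, b, c) :: pvZip3 rest
  | _ => []

def Translation_Table_alt (seq : String) : String :=
  PySem.Str.join "" ((pvZip3 seq.toList).map (fun t =>
    ((pvTrie.getD t.1 (PySem.Dict.mk [])).getD t.2.1 (PySem.Dict.mk [])).getD t.2.2 "?"))

-- ===== PRECONDITION & SPEC =====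
def Spec_Translation_Table (seq : String) (out : String) : Prop := out = Translation_Table_alt seq
instance (seq : String) (out : String) : Decidable (Spec_Translation_Table seq out) := by unfold Spec_Translation_Table; infer_instance

-- ===== CLAIM =====
def Claim_equal_Translation_Table : Prop := ∀ (seq : String), Dom_Translation_Table seq → Spec_Translation_Table seq (Translation_Table seq)

-- ===== LEMMAS AND PROOFS =====

-- B\'s per-codon trie lookup, named for the proofs
def pvLookB (a b c : Char) : String :=
  ((pvTrie.getD a (PySem.Dict.mk [])).getD b (PySem.Dict.mk [])).getD c "?"

-- the common chunk shape: translate consecutive triples, drop the leftover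
def pvChunk : List Char → String
  | a :: b :: c :: rest => pvLookB a b c ++ pvChunk rest
  | _ => ""

theorem pvDicA_mk : pvDicA = PySem.Dict.mk pvPairs := by rfl

theorem pvMissA (a b c : Char)
    (h : a ∉ ['T', 'C', 'A', 'G'] ∨ b ∉ ['T', 'C', 'A', 'G'] ∨ c ∉ ['T', 'C', 'A', 'G']) :
    pvDicA.getD (String.ofList [a, b, c]) "?" = "?" := by
  rcases h with h | h | h <;>
  · simp only [List.mem_cons, not_or] at h
    push Not at h
    obtain ⟨h1, h2, h3, h4, -⟩ := h
    simp [pvDicA_mk, pvPairs, PySem.Dict.getD, PySem.Dict.get?,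
          ← String.toList_inj, Ne.symm h1, Ne.symm h2, Ne.symm h3, Ne.symm h4]

theorem pvMissB_a (a b c : Char) (h : a ∉ ['T', 'C', 'A', 'G']) : pvLookB a b c = "?" := by
  simp only [List.mem_cons, not_or] at h
  push Not at h
  obtain ⟨h1, h2, h3, h4, -⟩ := h
  simp [pvLookB, pvTrie, PySem.Dict.getD, PySem.Dict.get?,
        Ne.symm h1, Ne.symm h2, Ne.symm h3, Ne.symm h4]

theorem pvMissB_b (a b c : Char) (ha : a ∈ ['T', 'C', 'A', 'G'])
    (h : b ∉ ['T', 'C', 'A', 'G']) : pvLookB a b c = "?" := by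
  simp only [List.mem_cons, not_or] at h
  push Not at h
  obtain ⟨h1, h2, h3, h4, -⟩ := h
  fin_cases ha <;>
    simp [pvLookB, pvTrie, PySem.Dict.getD, PySem.Dict.get?,
          Ne.symm h1, Ne.symm h2, Ne.symm h3, Ne.symm h4]

theorem pvMissB_c (a b c : Char) (ha : a ∈ ['T', 'C', 'A', 'G']) (hb : b ∈ ['T', 'C', 'A', 'G'])
    (h : c ∉ ['T', 'C', 'A', 'G']) : pvLookB a b c = "?" := by
  simp only [List.mem_cons, not_or] at h
  push Not at h
  obtain ⟨h1, h2, h3, h4, -⟩ := h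
  fin_cases ha <;> fin_cases hb <;>
    simp [pvLookB, pvTrie, PySem.Dict.getD, PySem.Dict.get?,
          Ne.symm h1, Ne.symm h2, Ne.symm h3, Ne.symm h4]

-- per-codon agreement: A\'s flat dict lookup equals B\'s trie lookup
theorem pvCodon_eq (a b c : Char) :
    pvDicA.getD (String.ofList [a, b, c]) "?" = pvLookB a b c := by
  by_cases ha : a ∈ ['T', 'C', 'A', 'G']
  · by_cases hb : b ∈ ['T', 'C', 'A', 'G']
    · by_cases hc : c ∈ ['T', 'C', 'A', 'G']
      · fin_cases ha <;> fin_cases hb <;> fin_cases hc <;> decide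
      · rw [pvMissA a b c (Or.inr (Or.inr hc)), pvMissB_c a b c ha hb hc]
    · rw [pvMissA a b c (Or.inr (Or.inl hb)), pvMissB_b a b c ha hb]
  · rw [pvMissA a b c (Or.inl ha), pvMissB_a a b c ha]

-- A\'s loop over range(0, len-2, 3), rewritten to drop/take form, equals pvChunk
theorem pvFoldA (l : List Char) : ∀ (acc : String),
    (List.range (l.length / 3)).foldl
      (fun s k => s ++ pvDicA.getD (String.ofList ((l.drop (3 * k)).take 3)) "?") acc
    = acc ++ pvChunk l := by
  induction l using pvChunk.induct with
  | case1 a b c rest ih =>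
    intro acc
    have hlen : (a :: b :: c :: rest).length / 3 = rest.length / 3 + 1 := by
      simp only [List.length_cons]
      omega
    rw [hlen, List.range_succ_eq_map, List.foldl_cons, List.foldl_map]
    have hfun : (fun (s : String) (k : ℕ) =>
        s ++ pvDicA.getD (String.ofList (((a :: b :: c :: rest).drop (3 * Nat.succ k)).take 3)) "?")
        = fun (s : String) (k : ℕ) =>
        s ++ pvDicA.getD (String.ofList ((rest.drop (3 * k)).take 3)) "?" := by
      funext s k
      congr 2
    rw [hfun, ih]
    show acc ++ pvDicA.getD (String.ofList [a, b, c]) "?" ++ pvChunk rest = _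
    rw [pvCodon_eq, String.append_assoc]
    rfl
  | case2 l h =>
    intro acc
    rcases l with _ | ⟨a, _ | ⟨b, _ | ⟨c, rest⟩⟩⟩
    · simp [pvChunk]
    · simp [pvChunk]
    · simp [pvChunk]
    · exact absurd rfl (h a b c rest)

-- B\'s join-of-map over the triples equals pvChunk
theorem pvFoldB (l : List Char) :
    PySem.Str.join "" ((pvZip3 l).map (fun t =>
      ((pvTrie.getD t.1 (PySem.Dict.mk [])).getD t.2.1 (PySem.Dict.mk [])).getD t.2.2 "?"))
    = pvChunk l := by
  induction l using pvZip3.induct with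
  | case1 a b c rest ih =>
    rw [← String.toList_inj] at ih ⊢
    rw [pvZip3, List.map_cons]
    rw [PySem.Str.toList_join] at ih ⊢
    simp only [show ("" : String).toList = [] from rfl] at ih ⊢
    rw [List.map_cons]
    show PySem.Chars.join [] (_ :: _) = _
    have hcons : ∀ (x : List Char) (xs : List (List Char)),
        PySem.Chars.join [] (x :: xs) = x ++ PySem.Chars.join [] xs := by
      intro x xs
      show List.intercalate [] (x :: xs) = x ++ List.intercalate [] xs
      cases xs <;> simp [List.intercalate]
    rw [hcons, ih]
    show _ = (pvChunk (a :: b :: c :: rest)).toList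
    simp [pvChunk, pvLookB]
  | case2 l h =>
    rcases l with _ | ⟨a, _ | ⟨b, _ | ⟨c, rest⟩⟩⟩
    · rfl
    · rfl
    · rfl
    · exact absurd rfl (h a b c rest)

-- the codon count of A\'s range
theorem pvCount (L : ℕ) :
    (if (0:ℤ) < (L:ℤ) - 2 then (((L:ℤ) - 2 - 0 + 3 - 1) / 3).toNat else 0) = L / 3 := by
  split_ifs with h <;> omega

-- ===== VERDICT =====
theorem Translation_Table_spec : Claim_equal_Translation_Table := by
  intro seq _
  unfold Spec_Translation_Table Translation_Table Translation_Table_alt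
  rw [PySem.List.pyRange_of_pos 0 (PySem.Str.len seq - 2) (by norm_num : (0:ℤ) < 3)]
  rw [List.foldl_map]
  have hlen : PySem.Str.len seq = (seq.toList.length : ℤ) := PySem.Str.len_eq seq
  have hcount : (if (0:ℤ) < PySem.Str.len seq - 2
      then ((PySem.Str.len seq - 2 - 0 + 3 - 1) / 3).toNat else 0) = seq.toList.length / 3 := by
    rw [hlen]
    exact pvCount seq.toList.length
  rw [show (if 0 < PySem.Str.len seq - 2 then ((PySem.Str.len seq - 2 - 0 + 3 - 1) / 3).toNat else 0)
      = seq.toList.length / 3 from hcount]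
  have hslice : ∀ k : ℕ,
      PySem.Str.slice seq (some (0 + 3 * (k:ℤ))) (some (0 + 3 * (k:ℤ) + 3))
      = String.ofList ((seq.toList.drop (3 * k)).take 3) := by
    intro k
    rw [← String.toList_inj, PySem.Str.toList_slice, PySem.Chars.slice_eq_listSlice,
        show (0 + 3 * (k:ℤ)) = ((3 * k : ℕ) : ℤ) by push_cast; ring,
        show (((3 * k : ℕ) : ℤ) + 3) = ((3 * k : ℕ) : ℤ) + ((3:ℕ) : ℤ) by push_cast; ring,
        PySem.List.slice_natCast_add, String.toList_ofList]
  have hfun : (fun (s : String) (k : ℕ) =>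
      s ++ pvDicA.getD (PySem.Str.slice seq (some (0 + 3 * (k:ℤ))) (some (0 + 3 * (k:ℤ) + 3))) "?")
      = fun (s : String) (k : ℕ) =>
      s ++ pvDicA.getD (String.ofList ((seq.toList.drop (3 * k)).take 3)) "?" := by
    funext s k
    rw [hslice]
  rw [hfun, pvFoldA, pvFoldB]
  rfl
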